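-- pv_equiv track=rewrite | github.com/yyysolhhh/Python_Algorithm_study | Programmers/PCCP모의고사_#1_외톨이알파벳.py | solution
-- ===== SOURCE A (Python) =====
-- def solution(input_string):
--     answer = ''
--     str = []
--     for i, ch in enumerate(input_string):
--         if not str or str[-1] != ch:
--             if ch in str and ch not in answer:
--                 answer += ch
--             str.append(ch)
--     if not answer:
--         return "N"
--     return ''.join(sorted(answer))
-- ===== SOURCE B (Python) =====
-- def lonely(c, s):
--     # 3-state scan: 0 = before first c, 1 = inside/after first c-run, 2 = saw a gap after c
--     state = 0
--     for x in s:
--         if state == 0: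
--             if x == c:
--                 state = 1
--         elif state == 1:
--             if x != c:
--                 state = 2
--         else:
--             if x == c:
--                 return True
--     return False
--
--
-- def solution(input_string):
--     res = ''.join(c for c in sorted(set(input_string)) if lonely(c, input_string))
--     return res if res else "N"
-- ===== Notes on version B (the rewrite author's own statement) =====
-- stated objective: alternative
-- what changed: Instead of A's single pass that builds a run-head list and tests each new run head for membership in that list and in the growing answer, B checks each distinct letter independently with a 3-state automaton scan (c seen / gap seen / c again) over the whole string and keeps the sorted letters that pass.
import Mathlib
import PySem

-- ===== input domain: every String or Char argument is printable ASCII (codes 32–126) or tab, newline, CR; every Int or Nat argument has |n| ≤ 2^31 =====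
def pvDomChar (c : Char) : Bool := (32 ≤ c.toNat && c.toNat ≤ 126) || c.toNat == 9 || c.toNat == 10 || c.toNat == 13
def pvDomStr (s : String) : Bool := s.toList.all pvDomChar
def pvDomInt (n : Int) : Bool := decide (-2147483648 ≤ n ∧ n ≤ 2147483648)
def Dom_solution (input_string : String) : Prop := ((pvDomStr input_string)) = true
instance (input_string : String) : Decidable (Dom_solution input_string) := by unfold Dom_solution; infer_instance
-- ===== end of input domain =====

-- B replaces A's run-head list with membership tests by an independent 3-state automaton scan per distinct letter (objective: alternative).

-- ===== PORT A =====
def solution (input_string : String) : String :=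
  let st := (PySem.List.enumerate input_string.toList 0).foldl
    (fun (acc : List Char × List Char) ic =>
      if acc.2 = [] ∨ acc.2.getLast? ≠ some ic.2 then
        (if ic.2 ∈ acc.2 ∧ ic.2 ∉ acc.1 then acc.1 ++ [ic.2] else acc.1, acc.2 ++ [ic.2])
      else acc)
    (([] : List Char), ([] : List Char))
  if st.1 = [] then "N" else String.ofList (PySem.List.sorted st.1 (fun x => x) false)

-- ===== PORT B =====
-- the 'lonely' helper of Source B: state 0 = before first c, 1 = in/after first c-run, 2 = gap seen
def lonelyGo (c : Char) : List Char → Nat → Bool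
  | [], _ => false
  | x :: xs, st =>
    if st = 0 then lonelyGo c xs (if x = c then 1 else 0)
    else if st = 1 then lonelyGo c xs (if x ≠ c then 2 else 1)
    else if x = c then true
    else lonelyGo c xs st

def solution_alt (input_string : String) : String :=
  let res := (PySem.List.sorted (PySem.Set.ofList input_string.toList) (fun x => x) false).filter
      (fun c => lonelyGo c input_string.toList 0)
  if res = [] then "N" else String.ofList res

-- ===== PRECONDITION & SPEC =====
def Spec_solution (input_string : String) (out : String) : Prop := out = solution_alt input_string
instance (input_string : String) (out : String) : Decidable (Spec_solution input_string out) := by unfold Spec_solution; infer_instance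

-- ===== CLAIM (what is proved, stated in full; the proofs are below) =====
def Claim_equal_solution : Prop := ∀ (input_string : String), Dom_solution input_string → Spec_solution input_string (solution input_string)

-- ===== LEMMAS AND PROOFS =====

def stepA (acc : List Char × List Char) (ch : Char) : List Char × List Char :=
  if acc.2 = [] ∨ acc.2.getLast? ≠ some ch then
    (if ch ∈ acc.2 ∧ ch ∉ acc.1 then acc.1 ++ [ch] else acc.1, acc.2 ++ [ch])
  else acc

-- run heads of a list given the previous character
def runHeads : List Char → Option Char → List Char
  | [], _ => []
  | x :: xs, p => if some x ≠ p then x :: runHeads xs (some x) else runHeads xs (some x)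

theorem foldl_enum_stepA : ∀ (xs : List Char) (s : Int) (acc : List Char × List Char),
    (PySem.List.enumerate xs s).foldl (fun a ic => stepA a ic.2) acc = xs.foldl stepA acc := by
  intro xs
  induction xs with
  | nil => intro s acc; simp [PySem.List.enumerate_nil]
  | cons c xs ih =>
    intro s acc
    rw [PySem.List.enumerate_cons]
    simp only [List.foldl_cons]
    exact ih _ _

theorem invA : ∀ (xs ans ks : List Char),
    ans.Nodup → (∀ c, c ∈ ans ↔ 2 ≤ ks.count c) →
    (xs.foldl stepA (ans, ks)).1.Nodup ∧
      (∀ c, c ∈ (xs.foldl stepA (ans, ks)).1 ↔ 2 ≤ (xs.foldl stepA (ans, ks)).2.count c) := by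
  intro xs
  induction xs with
  | nil => intro ans ks h1 h2; exact ⟨h1, h2⟩
  | cons ch xs ih =>
    intro ans ks h1 h2
    have key : ∀ (c : Char), (ks ++ [ch]).count c = ks.count c + if c = ch then 1 else 0 := by
      intro c
      by_cases h : c = ch
      · simp [List.count_append, h]
      · have h' : ¬ ch = c := fun e => h e.symm
        simp [List.count_append, h, h']
    simp only [List.foldl_cons]
    by_cases hc : ks = [] ∨ ks.getLast? ≠ some ch
    · rw [show stepA (ans, ks) ch
          = (if ch ∈ ks ∧ ch ∉ ans then ans ++ [ch] else ans, ks ++ [ch]) from by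
        simp [stepA, hc]]
      by_cases hm : ch ∈ ks ∧ ch ∉ ans
      · rw [if_pos hm]
        apply ih
        · simp [List.nodup_append, h1]
          exact fun a ha hEq => hm.2 (hEq ▸ ha)
        · intro c
          rw [key]
          by_cases hcc : c = ch
          · subst hcc
            have hpos : 0 < ks.count c := List.count_pos_iff.mpr hm.1
            exact iff_of_true (by simp) (by rw [if_pos rfl]; omega)
          · rw [if_neg hcc, add_zero]
            have : c ∈ ans ++ [ch] ↔ c ∈ ans := by simp [List.mem_append, hcc]
            rw [this]; exact h2 c
      · rw [if_neg hm]
        refine ih _ _ h1 ?_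
        intro c
        rw [key]
        by_cases hcc : c = ch
        · subst hcc
          rcases not_and_or.mp hm with hks | ha
          · have h0 : ks.count c = 0 := List.count_eq_zero.mpr hks
            have ha' : c ∉ ans := fun h => by have := (h2 c).mp h; omega
            exact iff_of_false ha' (by rw [if_pos rfl]; omega)
          · have ha' : c ∈ ans := not_not.mp ha
            have := (h2 c).mp ha'
            exact iff_of_true ha' (by rw [if_pos rfl]; omega)
        · rw [if_neg hcc, add_zero]; exact h2 c
    · rw [show stepA (ans, ks) ch = (ans, ks) from by simp [stepA, hc]]
      exact ih ans ks h1 h2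

-- the stepA fold's key list is exactly the run heads
theorem keysA : ∀ (xs ans ks : List Char) (p : Option Char),
    ((p = none ∧ ks = []) ∨ (∃ c, p = some c ∧ ks.getLast? = some c)) →
    (xs.foldl stepA (ans, ks)).2 = ks ++ runHeads xs p := by
  intro xs
  induction xs with
  | nil => intro ans ks p _; simp [runHeads]
  | cons c xs ih =>
    intro ans ks p h
    simp only [List.foldl_cons]
    rcases h with ⟨hp, hks⟩ | ⟨d, hp, hl⟩
    · subst hp; subst hks
      rw [show stepA (ans, []) c = (ans, [c]) from by simp [stepA]]
      rw [ih _ _ _ (Or.inr ⟨c, rfl, rfl⟩)]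
      simp [runHeads]
    · subst hp
      have hne : ks ≠ [] := by intro h0; rw [h0] at hl; simp at hl
      by_cases hdc : d = c
      · rw [show stepA (ans, ks) c = (ans, ks) from by simp [stepA, hne, hl, hdc]]
        rw [ih _ _ _ (Or.inr ⟨c, rfl, by rw [hl, hdc]⟩)]
        subst hdc
        simp [runHeads]
      · rw [show stepA (ans, ks) c
            = (if c ∈ ks ∧ c ∉ ans then ans ++ [c] else ans, ks ++ [c]) from by
          simp [stepA, hl, hdc]]
        rw [ih _ _ _ (Or.inr ⟨c, rfl, by simp⟩)]
        have : some c ≠ some d := by simp [Ne.symm hdc]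
        simp [runHeads, this]
  
theorem mem_runHeads : ∀ (xs : List Char) (p : Option Char) (c : Char),
    c ∈ runHeads xs p → c ∈ xs := by
  intro xs
  induction xs with
  | nil => intro p c h; simp [runHeads] at h
  | cons x xs ih =>
    intro p c h
    simp only [runHeads] at h
    by_cases hx : some x ≠ p
    · rw [if_pos hx] at h
      rcases List.mem_cons.mp h with h | h
      · simp [h]
      · exact List.mem_cons_of_mem _ (ih _ _ h)
    · rw [if_neg hx] at h
      exact List.mem_cons_of_mem _ (ih _ _ h)

theorem auto2 : ∀ (c : Char) (xs : List Char) (p : Option Char), p ≠ some c →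
    (lonelyGo c xs 2 = true ↔ 1 ≤ (runHeads xs p).count c) := by
  intro c xs
  induction xs with
  | nil => intro p _; simp [lonelyGo, runHeads]
  | cons x xs ih =>
    intro p hp
    by_cases hx : x = c
    · subst hx
      have : some x ≠ p := fun h => hp h.symm
      simp [lonelyGo, runHeads, this]
    · have h1 : lonelyGo c (x :: xs) 2 = lonelyGo c xs 2 := by simp [lonelyGo, hx]
      have h2 : (runHeads (x :: xs) p).count c = (runHeads xs (some x)).count c := by
        by_cases hxp : some x ≠ p
        · simp [runHeads, hxp, hx]
        · simp [runHeads, hxp]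
      rw [h1, h2]
      exact ih (some x) (by simp [hx])

theorem auto1 : ∀ (c : Char) (xs : List Char),
    lonelyGo c xs 1 = true ↔ 1 ≤ (runHeads xs (some c)).count c := by
  intro c xs
  induction xs with
  | nil => simp [lonelyGo, runHeads]
  | cons x xs ih =>
    by_cases hx : x = c
    · subst hx
      simp only [show lonelyGo x (x :: xs) 1 = lonelyGo x xs 1 from by simp [lonelyGo],
        show runHeads (x :: xs) (some x) = runHeads xs (some x) from by simp [runHeads]]
      exact ih
    · have h1 : lonelyGo c (x :: xs) 1 = lonelyGo c xs 2 := by simp [lonelyGo, hx]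
      have h2 : runHeads (x :: xs) (some c) = x :: runHeads xs (some x) := by
        simp [runHeads, hx]
      rw [h1, h2, List.count_cons, if_neg (by simp [hx] : ¬ ((x == c) = true)), add_zero]
      exact auto2 c xs (some x) (by simp [hx])

theorem auto0 : ∀ (c : Char) (xs : List Char) (p : Option Char), p ≠ some c →
    (lonelyGo c xs 0 = true ↔ 2 ≤ (runHeads xs p).count c) := by
  intro c xs
  induction xs with
  | nil => intro p _; simp [lonelyGo, runHeads]
  | cons x xs ih =>
    intro p hp
    by_cases hx : x = c
    · subst hx
      have hne : some x ≠ p := fun h => hp h.symm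
      have h1 : lonelyGo x (x :: xs) 0 = lonelyGo x xs 1 := by simp [lonelyGo]
      have h2 : runHeads (x :: xs) p = x :: runHeads xs (some x) := by simp [runHeads, hne]
      rw [h1, h2, List.count_cons]
      rw [auto1 x xs]
      simp
    · have h1 : lonelyGo c (x :: xs) 0 = lonelyGo c xs 0 := by simp [lonelyGo, hx]
      have h2 : (runHeads (x :: xs) p).count c = (runHeads xs (some x)).count c := by
        by_cases hxp : some x ≠ p
        · simp [runHeads, hxp, Ne.symm (fun h => hx h.symm)]
        · simp [runHeads, hxp]
      rw [h1, h2]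
      exact ih (some x) (by simp [hx])

-- ===== VERDICT (by name: the statement is the Claim_ definition above) =====
theorem solution_spec : Claim_equal_solution := by
  intro s _
  simp only [Spec_solution, solution, solution_alt]
  rw [show (fun (acc : List Char × List Char) (ic : Int × Char) =>
        if acc.2 = [] ∨ acc.2.getLast? ≠ some ic.2 then
          (if ic.2 ∈ acc.2 ∧ ic.2 ∉ acc.1 then acc.1 ++ [ic.2] else acc.1, acc.2 ++ [ic.2])
        else acc) = (fun a ic => stepA a ic.2) from rfl]
  rw [foldl_enum_stepA]
  set l := s.toList with hl
  set st := l.foldl stepA ([], []) with hst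
  have hInv := invA l [] [] (by simp) (by simp)
  have hKeys : st.2 = runHeads l none := by
    rw [hst, keysA l [] [] none (Or.inl ⟨rfl, rfl⟩)]; rfl
  set ys := (PySem.List.sorted (PySem.Set.ofList l) (fun x => x) false).filter
      (fun c => lonelyGo c l 0) with hys
  have hpw : ys.Pairwise (· < ·) :=
    (PySem.List.sorted_ofList_pairwise_lt l).filter _
  have hysnodup : ys.Nodup := hpw.imp (fun h => ne_of_lt h)
  have hmem : ∀ c, c ∈ st.1 ↔ c ∈ ys := by
    intro c
    rw [hInv.2 c, hKeys, hys, List.mem_filter,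
      PySem.List.mem_sorted, PySem.Set.mem_ofList]
    rw [← auto0 c l none (by simp)]
    constructor
    · intro h
      have h2 := (auto0 c l none (by simp)).mp h
      have hc : c ∈ runHeads l none := List.count_pos_iff.mp (by omega)
      exact ⟨mem_runHeads l none c hc, h⟩
    · exact fun h => h.2
  have hperm : ys.Perm st.1 := (List.perm_ext_iff_of_nodup hysnodup hInv.1).mpr
    (fun c => (hmem c).symm)
  have hs : PySem.List.sorted st.1 (fun x => x) false = ys :=
    PySem.List.sorted_eq_of_perm_of_pairwise_lt st.1 ys (fun x => x) hperm hpw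
  have hnil : (st.1 = []) ↔ (ys = []) := by
    constructor <;> intro h
    · have hp := hperm; rw [h] at hp; exact hp.eq_nil
    · have hp := hperm; rw [h] at hp; exact hp.symm.eq_nil
  rw [hs]
  by_cases h0 : ys = []
  · rw [if_pos (hnil.mpr h0), if_pos h0]
  · rw [if_neg (fun h => h0 (hnil.mp h)), if_neg h0]
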